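-- pv_equiv track=rewrite | github.com/MasonStooksbury/Free-Games | seleniumbase/fixtures/xpath_to_css.py | _handle_brackets_in_strings
-- ===== SOURCE A (Python) =====
-- def _handle_brackets_in_strings(xpath):
--     # Edge Case: Brackets in strings.
--     # Example from GitHub.com -
--     # '<input type="text" id="user[login]">' => '//*[@id="user[login]"]'
--     # Need to tell apart string-brackets from regular brackets
--     new_xpath = ""
--     chunks = xpath.split('"')
--     len_chunks = len(chunks)
--     for chunk_num in range(len_chunks):
--         if chunk_num % 2 != 0:
--             chunks[chunk_num] = chunks[chunk_num].replace(
--                 '[', '_STR_L_bracket_')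
--             chunks[chunk_num] = chunks[chunk_num].replace(
--                 ']', '_STR_R_bracket_')
--         new_xpath += chunks[chunk_num]
--         if chunk_num != len_chunks - 1:
--             new_xpath += '"'
--     return new_xpath
-- ===== SOURCE B (Python) =====
-- def _handle_brackets_in_strings(xpath):
--     # One-pass state machine: toggle in_string on each '"', rewrite brackets inside strings.
--     in_string = False
--     out = []
--     for ch in xpath:
--         if in_string and ch == '[':
--             out.append('_STR_L_bracket_')
--         elif in_string and ch == ']':
--             out.append('_STR_R_bracket_')
--         else:
--             out.append(ch)
--         if ch == '"':
--             in_string = not in_string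
--     return ''.join(out)
-- ===== Notes on version B (the rewrite author's own statement) =====
-- stated objective: alternative
-- what changed: Replaced split-on-quote plus per-chunk str.replace passes by a single character-at-a-time scan maintaining an in_string flag that toggles on each '"' and rewrites '[' / ']' only while the flag is set.
import Mathlib
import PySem

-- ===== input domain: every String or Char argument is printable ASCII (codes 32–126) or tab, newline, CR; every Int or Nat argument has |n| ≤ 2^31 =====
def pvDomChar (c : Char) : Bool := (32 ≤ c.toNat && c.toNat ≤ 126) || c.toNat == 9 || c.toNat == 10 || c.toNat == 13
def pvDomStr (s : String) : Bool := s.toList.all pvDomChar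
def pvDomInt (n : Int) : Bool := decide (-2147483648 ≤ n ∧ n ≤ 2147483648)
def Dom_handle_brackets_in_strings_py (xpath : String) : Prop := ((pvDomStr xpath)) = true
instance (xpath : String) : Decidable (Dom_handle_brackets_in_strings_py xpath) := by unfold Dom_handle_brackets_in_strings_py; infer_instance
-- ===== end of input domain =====

-- B replaces A's split-on-quote + per-chunk str.replace by a one-pass scan with an in_string flag (alternative decomposition, same O(n) cost).

-- ===== PORT A =====
-- splits on '"', replaces brackets in odd-numbered chunks, rejoins with '"'
def handle_brackets_in_strings_py (xpath : String) : String :=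
  let chunks := PySem.Chars.splitOn xpath.toList ['"']
  let len_chunks : Int := chunks.length
  let new_xpath := (PySem.List.enumerate chunks).foldl (fun new_xpath (p : Int × List Char) =>
    let chunk :=
      if PySem.Int.mod p.1 2 ≠ 0 then
        PySem.Chars.replace (PySem.Chars.replace p.2 ['['] "_STR_L_bracket_".toList)
          [']'] "_STR_R_bracket_".toList
      else p.2
    let new_xpath := new_xpath ++ chunk
    if p.1 ≠ len_chunks - 1 then new_xpath ++ ['"'] else new_xpath) []
  String.mk new_xpath

-- ===== PORT B =====
-- single pass: an in_string flag toggled by '"', brackets rewritten only inside strings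
def handle_brackets_in_strings_py_alt (xpath : String) : String :=
  let step := fun (st : Bool × List Char) (ch : Char) =>
    let out :=
      if st.1 && (ch == '[') then st.2 ++ "_STR_L_bracket_".toList
      else if st.1 && (ch == ']') then st.2 ++ "_STR_R_bracket_".toList
      else st.2 ++ [ch]
    (if ch == '"' then !st.1 else st.1, out)
  String.mk (xpath.toList.foldl step (false, [])).2

-- ===== PRECONDITION & SPEC =====
def Spec_handle_brackets_in_strings_py (xpath : String) (out : String) : Prop := out = handle_brackets_in_strings_py_alt xpath
instance (xpath : String) (out : String) : Decidable (Spec_handle_brackets_in_strings_py xpath out) := by unfold Spec_handle_brackets_in_strings_py; infer_instance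

-- ===== CLAIM (what is proved, stated in full; the proofs are below) =====
def Claim_equal_handle_brackets_in_strings_py : Prop := ∀ (xpath : String), Dom_handle_brackets_in_strings_py xpath → Spec_handle_brackets_in_strings_py xpath (handle_brackets_in_strings_py xpath)

-- ===== LEMMAS AND PROOFS =====

-- translation of one character inside a quoted string
def pvTransl (c : Char) : List Char :=
  if c = '[' then "_STR_L_bracket_".toList
  else if c = ']' then "_STR_R_bracket_".toList
  else [c]

-- bracket replacement over a chunk
def pvRep (l : List Char) : List Char := l.flatMap pvTransl

-- reference split on '"' (structural form of Python's split)
def pvSplitQ : List Char → List (List Char)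
  | [] => [[]]
  | c :: cs =>
      if c = '"' then [] :: pvSplitQ cs
      else (c :: (pvSplitQ cs).headI) :: (pvSplitQ cs).tail

-- join chunks with '"', applying pvRep to chunks of odd parity (b = current parity)
def pvJoinRep : Bool → List (List Char) → List Char
  | _, [] => []
  | b, [ch] => if b then pvRep ch else ch
  | b, ch :: rest => (if b then pvRep ch else ch) ++ '"' :: pvJoinRep (!b) rest

theorem pvSplitQ_ne_nil (cs : List Char) : pvSplitQ cs ≠ [] := by
  cases cs with
  | nil => simp [pvSplitQ]
  | cons c cs => by_cases h : c = '"' <;> simp [pvSplitQ, h]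

theorem pvGoSplit (fuel : Nat) (l cur : List Char) (acc : List (List Char))
    (h : l.length < fuel) :
    PySem.Chars.splitOn.go ['"'] fuel l cur acc =
      acc.reverse ++ (cur.reverse ++ (pvSplitQ l).headI) :: (pvSplitQ l).tail := by
  induction fuel generalizing l cur acc with
  | zero => omega
  | succ fuel ih =>
    cases l with
    | nil => simp [PySem.Chars.splitOn.go, pvSplitQ]
    | cons c rest =>
      by_cases hc : c = '"'
      · subst hc
        have : (['"'] : List Char).isPrefixOf ('"' :: rest) = true := by simp [List.isPrefixOf]
        rw [PySem.Chars.splitOn.go, if_pos this]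
        rw [show List.drop (['"'] : List Char).length ('"' :: rest) = rest from rfl]
        simp only [List.length_cons] at h
        rw [ih rest [] (cur.reverse :: acc) (by omega)]
        obtain ⟨t, ts, hts⟩ : ∃ t ts, pvSplitQ rest = t :: ts := by
          cases hx : pvSplitQ rest with
          | nil => exact absurd hx (pvSplitQ_ne_nil rest)
          | cons t ts => exact ⟨t, ts, rfl⟩
        simp [pvSplitQ, hts]
      · have hpre : (['"'] : List Char).isPrefixOf (c :: rest) = false := by
          simp [List.isPrefixOf]
          intro h'; exact hc h'.symm
        rw [PySem.Chars.splitOn.go, if_neg (by simp [hpre])]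
        simp only [List.length_cons] at h
        rw [ih rest (c :: cur) acc (by omega)]
        obtain ⟨t, ts, hts⟩ : ∃ t ts, pvSplitQ rest = t :: ts := by
          cases hx : pvSplitQ rest with
          | nil => exact absurd hx (pvSplitQ_ne_nil rest)
          | cons t ts => exact ⟨t, ts, rfl⟩
        simp [pvSplitQ, hc, hts]

theorem pvSplitOn_eq (l : List Char) : PySem.Chars.splitOn l ['"'] = pvSplitQ l := by
  rw [PySem.Chars.splitOn, pvGoSplit (l.length + 1) l [] [] (by omega)]
  obtain ⟨t, ts, hts⟩ : ∃ t ts, pvSplitQ l = t :: ts := by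
    cases hx : pvSplitQ l with
    | nil => exact absurd hx (pvSplitQ_ne_nil l)
    | cons t ts => exact ⟨t, ts, rfl⟩
  simp [hts]

theorem pvReplaceGo (c : Char) (new : List Char) (fuel : Nat) :
    ∀ (l acc : List Char), l.length ≤ fuel →
    PySem.Chars.replace.go [c] new fuel l acc =
      acc.reverse ++ l.flatMap (fun x => if x = c then new else [x]) := by
  induction fuel with
  | zero =>
    intro l acc h
    have : l = [] := by cases l <;> simp_all
    subst this; simp [PySem.Chars.replace.go]
  | succ fuel ih =>
    intro l acc h
    cases l with
    | nil => simp [PySem.Chars.replace.go]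
    | cons x rest =>
      by_cases hx : x = c
      · subst hx
        have hpre : ([x] : List Char).isPrefixOf (x :: rest) = true := by simp [List.isPrefixOf]
        rw [PySem.Chars.replace.go, if_pos hpre]
        rw [show List.drop ([x] : List Char).length (x :: rest) = rest from rfl]
        simp only [List.length_cons] at h
        rw [ih rest (new.reverse ++ acc) (by omega)]
        simp
      · have hpre : ([c] : List Char).isPrefixOf (x :: rest) = false := by
          simp [List.isPrefixOf]
          intro h'; exact absurd h'.symm hx
        rw [PySem.Chars.replace.go, if_neg (by simp [hpre])]
        simp only [List.length_cons] at h
        rw [ih rest (x :: acc) (by omega)]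
        simp [hx]

theorem pvReplaceSingle (l : List Char) (c : Char) (new : List Char) :
    PySem.Chars.replace l [c] new = l.flatMap (fun x => if x = c then new else [x]) := by
  rw [PySem.Chars.replace]
  simp only [List.isEmpty_cons, Bool.false_eq_true, if_false]
  rw [pvReplaceGo c new l.length l [] (le_refl _)]
  simp

theorem pvRep2_eq (l : List Char) :
    PySem.Chars.replace (PySem.Chars.replace l ['['] "_STR_L_bracket_".toList)
      [']'] "_STR_R_bracket_".toList = pvRep l := by
  rw [pvReplaceSingle, pvReplaceSingle, List.flatMap_assoc, pvRep]
  apply List.flatMap_congr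
  intro x _
  by_cases h1 : x = '['
  · subst h1; decide
  · by_cases h2 : x = ']' <;> simp [h1, h2, pvTransl]

theorem pvJoinRep_cons (b : Bool) (c : Char) (t : List Char) (ts : List (List Char)) :
    pvJoinRep b ((c :: t) :: ts) = (if b then pvTransl c else [c]) ++ pvJoinRep b (t :: ts) := by
  cases ts with
  | nil => cases b <;> simp [pvJoinRep, pvRep]
  | cons u us => cases b <;> simp [pvJoinRep, pvRep]

-- A's loop, generalised over the start index of enumerate
theorem pvAFold (Lc : Int) :
    ∀ (cs : List (List Char)) (k : Nat) (acc : List Char),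
    (k : Int) + cs.length = Lc →
    (PySem.List.enumerate cs (k : Int)).foldl (fun new_xpath (p : Int × List Char) =>
        let chunk := if PySem.Int.mod p.1 2 ≠ 0 then pvRep p.2 else p.2
        let new_xpath := new_xpath ++ chunk
        if p.1 ≠ Lc - 1 then new_xpath ++ ['"'] else new_xpath) acc
      = acc ++ pvJoinRep (decide (k % 2 = 1)) cs := by
  intro cs
  induction cs with
  | nil => intro k acc h; simp [PySem.List.enumerate_nil, pvJoinRep]
  | cons ch rest ih =>
    intro k acc h
    rw [PySem.List.enumerate_cons, List.foldl_cons]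
    have hmod : PySem.Int.mod (k : Int) 2 = ((k % 2 : Nat) : Int) := by
      exact_mod_cast PySem.Int.mod_natCast k 2
    simp only [List.length_cons] at h
    push_cast at h
    have hk1 : ((k : Int) + 1) = ((k + 1 : Nat) : Int) := by push_cast; ring
    rw [hk1, ih (k + 1) _ (by push_cast; omega)]
    have hpar : ((k + 1) % 2 = 1) = ¬ (k % 2 = 1) := by
      simp only [eq_iff_iff]; omega
    have hcond : (PySem.Int.mod (k : Int) 2 ≠ 0) ↔ (k % 2 = 1) := by rw [hmod]; omega
    cases rest with
    | nil =>
      have hlast : ¬ ((k : Int) ≠ Lc - 1) := by simp at h ⊢; omega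
      simp only [if_neg hlast]
      by_cases hp : k % 2 = 1
      · have hif : (if PySem.Int.mod (k : Int) 2 ≠ 0 then pvRep ch else ch) = pvRep ch :=
          if_pos (hcond.mpr hp)
        simp only [hif, pvJoinRep, hp, decide_true, if_true, List.append_nil]
      · have hif : (if PySem.Int.mod (k : Int) 2 ≠ 0 then pvRep ch else ch) = ch :=
          if_neg (fun hcc => hp (hcond.mp hcc))
        simp only [hif, pvJoinRep, hp, decide_false, if_false, List.append_nil, Bool.false_eq_true]
    | cons u us =>
      have hlast : (k : Int) ≠ Lc - 1 := by
        have : (0 : Int) ≤ (u :: us).length := by positivity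
        simp only [List.length_cons] at h ⊢
        push_cast at h; omega
      simp only [if_pos hlast]
      have hshape : pvJoinRep (decide (k % 2 = 1)) (ch :: u :: us)
          = (if decide (k % 2 = 1) then pvRep ch else ch) ++ '"' :: pvJoinRep (!decide (k % 2 = 1)) (u :: us) := by
        cases hb : decide (k % 2 = 1) <;> simp [pvJoinRep]
      by_cases hp : k % 2 = 1
      · have hb2 : decide ((k + 1) % 2 = 1) = !decide (k % 2 = 1) := by
          simp [hp, show (k + 1) % 2 = 0 by omega]
        have hif : (if PySem.Int.mod (k : Int) 2 ≠ 0 then pvRep ch else ch) = pvRep ch :=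
          if_pos (hcond.mpr hp)
        simp only [hif, hb2, hp, decide_true]
        simp [pvJoinRep]
      · have hb2 : decide ((k + 1) % 2 = 1) = !decide (k % 2 = 1) := by
          simp [hp, show (k + 1) % 2 = 1 by omega]
        have hif : (if PySem.Int.mod (k : Int) 2 ≠ 0 then pvRep ch else ch) = ch :=
          if_neg (fun hcc => hp (hcond.mp hcc))
        simp only [hif, hb2, hp, decide_false]
        simp [pvJoinRep]

-- B's loop
theorem pvBFold :
    ∀ (cs : List Char) (b : Bool) (acc : List Char),
    (cs.foldl (fun (st : Bool × List Char) (ch : Char) =>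
        let out :=
          if st.1 && (ch == '[') then st.2 ++ "_STR_L_bracket_".toList
          else if st.1 && (ch == ']') then st.2 ++ "_STR_R_bracket_".toList
          else st.2 ++ [ch]
        (if ch == '"' then !st.1 else st.1, out)) (b, acc)).2
      = acc ++ pvJoinRep b (pvSplitQ cs) := by
  intro cs
  induction cs with
  | nil => intro b acc; cases b <;> simp [pvJoinRep, pvSplitQ, pvRep]
  | cons c rest ih =>
    intro b acc
    obtain ⟨t, ts, hts⟩ : ∃ t ts, pvSplitQ rest = t :: ts := by
      cases hx : pvSplitQ rest with
      | nil => exact absurd hx (pvSplitQ_ne_nil rest)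
      | cons t ts => exact ⟨t, ts, rfl⟩
    by_cases hc : c = '"'
    · subst hc
      rw [List.foldl_cons]
      simp only [show (('"' == '[') = false) by decide, show (('"' == ']') = false) by decide,
        Bool.and_false, Bool.false_eq_true, if_false, show (('"' == '"') = true) by decide, if_pos]
      rw [ih (!b) (acc ++ ['"'])]
      have : pvSplitQ ('"' :: rest) = [] :: t :: ts := by simp [pvSplitQ, hts]
      rw [this]
      cases b <;> simp [pvJoinRep, pvRep, hts]
    · rw [List.foldl_cons]
      have hq : (c == '"') = false := by simp [hc]
      have hsq : pvSplitQ (c :: rest) = (c :: t) :: ts := by simp [pvSplitQ, hc, hts]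
      simp only [hq, Bool.false_eq_true, if_false]
      rw [ih b]
      rw [hsq, hts, pvJoinRep_cons]
      by_cases h1 : c = '['
      · subst h1; cases b <;> simp [pvTransl]
      · by_cases h2 : c = ']'
        · subst h2; cases b <;> simp [pvTransl, h1]
        · have e1 : (c == '[') = false := by simp [h1]
          have e2 : (c == ']') = false := by simp [h2]
          cases b <;> simp [pvTransl, h1, h2, e1, e2]

-- ===== VERDICT (by name: the statement is the Claim_ definition above) =====
theorem handle_brackets_in_strings_py_spec : Claim_equal_handle_brackets_in_strings_py := by
  intro xpath _
  show handle_brackets_in_strings_py xpath = handle_brackets_in_strings_py_alt xpath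
  unfold handle_brackets_in_strings_py handle_brackets_in_strings_py_alt
  simp only []
  rw [pvBFold xpath.toList false []]
  have hstep : (fun (new_xpath : List Char) (p : Int × List Char) =>
      let chunk := if PySem.Int.mod p.1 2 ≠ 0 then
          PySem.Chars.replace (PySem.Chars.replace p.2 ['['] "_STR_L_bracket_".toList)
            [']'] "_STR_R_bracket_".toList
        else p.2
      let new_xpath := new_xpath ++ chunk
      if p.1 ≠ ((PySem.Chars.splitOn xpath.toList ['"']).length : Int) - 1 then new_xpath ++ ['"'] else new_xpath)
      = (fun (new_xpath : List Char) (p : Int × List Char) =>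
      let chunk := if PySem.Int.mod p.1 2 ≠ 0 then pvRep p.2 else p.2
      let new_xpath := new_xpath ++ chunk
      if p.1 ≠ ((PySem.Chars.splitOn xpath.toList ['"']).length : Int) - 1 then new_xpath ++ ['"'] else new_xpath) := by
    funext a p
    simp only [pvRep2_eq]
  rw [hstep]
  have hA := pvAFold ((PySem.Chars.splitOn xpath.toList ['"']).length : Int)
      (PySem.Chars.splitOn xpath.toList ['"']) 0 [] (by simp)
  simp only [Nat.cast_zero] at hA
  rw [hA]
  simp [pvSplitOn_eq]
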